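-- pv_equiv track=rewrite | github.com/timstevens1/go_fish | initialization.py | make_books
-- ===== SOURCE A (Python) =====
-- def make_books(player, counter):
--     # index of rank array is a mapping to num_decks
--     ranks = ['A','2','3','4','5','6','7','8','9','10','J','Q','K']
--     # counters of number of cards of a given rank in the hand
--     num_decks = [0,0,0,0,0,0,0,0,0,0,0,0,0]
--     for card in player:
--         # increments appropriate rank counter for each card
--         num_decks[ranks.index(card[:-1])] +=1
--     for i in range(12):
--         # 4 cards of a rank in the hand
--         if num_decks[i]>= 4:
--             # increment deck counter
--             counter+=1
--             # remove deck from hand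
--             player = [x for x in player if not ranks[i] in x]
--     return player, counter
-- ===== SOURCE B (Python) =====
-- def make_books(player, counter):
--     ranks = ['A','2','3','4','5','6','7','8','9','10','J','Q','K']
--     counts = dict.fromkeys(ranks, 0)
--     for card in player:
--         counts[card[:-1]] += 1
--     books = [r for r in ranks[:12] if counts[r] >= 4]
--     kept = [x for x in player if not any(r in x for r in books)]
--     return kept, counter + len(books)
-- ===== Notes on version B (the rewrite author's own statement) =====
-- stated objective: simpler
-- what changed: B replaces A's ranks.index-indexed counter array and its up-to-12 sequential filter passes over the hand by one counting pass into a dict pre-keyed with the 13 ranks, one scan of the first 12 ranks to collect the book ranks, and a single filter pass keeping cards that contain no book rank.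
import Mathlib
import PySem

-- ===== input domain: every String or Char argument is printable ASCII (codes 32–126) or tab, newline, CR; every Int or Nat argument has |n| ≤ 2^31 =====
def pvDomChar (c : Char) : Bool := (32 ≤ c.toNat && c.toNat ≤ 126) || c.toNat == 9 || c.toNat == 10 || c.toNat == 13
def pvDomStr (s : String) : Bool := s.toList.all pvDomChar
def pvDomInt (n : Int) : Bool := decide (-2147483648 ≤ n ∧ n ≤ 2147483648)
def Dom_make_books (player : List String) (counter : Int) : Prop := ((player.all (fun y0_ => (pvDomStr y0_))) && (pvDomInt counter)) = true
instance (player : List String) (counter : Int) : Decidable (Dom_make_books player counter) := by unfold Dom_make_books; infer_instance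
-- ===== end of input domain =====

-- B replaces A's up-to-12 repeated filter passes over the hand by one counting pass
-- (a dict), one scan over the first 12 ranks to list the books, and ONE filter pass
-- over the hand; objective: simpler. Hands with a card whose rank part card[:-1] is
-- not one of the 13 rank strings are excluded by Pre_ (A raises ValueError, B KeyError).

-- ===== PORT A =====
-- card[:-1]
def pvRank (card : String) : String := PySem.Str.slice card none (some (-1))

def pvRanksList : List String := ["A","2","3","4","5","6","7","8","9","10","J","Q","K"]

def make_books (player : List String) (counter : Int) : List String × Int :=
  -- num_decks[ranks.index(card[:-1])] += 1 ; a failing ranks.index raises (excluded by Pre_)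
  let num_decks : List Int :=
    player.foldl (fun nd card =>
      match PySem.List.index? pvRanksList (pvRank card) with
      | some i => nd.set i (nd.getD i 0 + 1)
      | none => nd) [0,0,0,0,0,0,0,0,0,0,0,0,0]
  (PySem.List.pyRange 0 12 1).foldl (fun (st : List String × Int) i =>
      if PySem.List.pyGetD num_decks i 0 ≥ 4 then
        (st.1.filter (fun x => !(PySem.Str.isIn (PySem.List.pyGetD pvRanksList i "") x)), st.2 + 1)
      else st) (player, counter)

-- ===== PORT B =====
def make_books_alt (player : List String) (counter : Int) : List String × Int :=
  -- counts = dict.fromkeys(ranks, 0)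
  let counts0 : PySem.Dict String Int :=
    pvRanksList.foldl (fun d r => d.insert r 0) PySem.Dict.empty
  -- counts[card[:-1]] += 1 ; a missing key raises KeyError (excluded by Pre_)
  let counts : PySem.Dict String Int :=
    player.foldl (fun d card =>
      match d.get? (pvRank card) with
      | some v => d.insert (pvRank card) (v + 1)
      | none => d) counts0
  -- counts[r] >= 4 ; the subscript raises on a missing key (never, for r in ranks)
  let books : List String :=
    (PySem.List.slice pvRanksList none (some 12)).filter (fun r =>
      match counts.get? r with
      | some v => decide (v ≥ 4)
      | none => false)
  let kept : List String :=
    player.filter (fun x => !(books.any (fun r => PySem.Str.isIn r x)))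
  (kept, counter + books.length)

-- ===== PRECONDITION & SPEC =====
-- Pre_ excludes hands containing a card whose rank part card[:-1] is not one of the
-- 13 rank strings: there A raises ValueError (ranks.index) and B raises KeyError.
def Pre_make_books (player : List String) (counter : Int) : Prop :=
  ∀ card ∈ player, pvRank card ∈ pvRanksList
instance (player : List String) (counter : Int) : Decidable (Pre_make_books player counter) := by
  unfold Pre_make_books; infer_instance

def pvWitness_make_books : List String × Int := (["AS", "AH", "AD", "AC", "2S"], 0)

def Spec_make_books (player : List String) (counter : Int) (out : List String × Int) : Prop := out = make_books_alt player counter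
instance (player : List String) (counter : Int) (out : List String × Int) : Decidable (Spec_make_books player counter out) := by unfold Spec_make_books; infer_instance

-- ===== CLAIM (what is proved, stated in full; the proofs are below) =====
def Claim_equal_make_books : Prop := ∀ (player : List String) (counter : Int), Dom_make_books player counter → Pre_make_books player counter → Spec_make_books player counter (make_books player counter)

-- ===== LEMMAS AND PROOFS =====

-- the rank count both programs compute, as a pure function
def pvCnt (player : List String) (r : String) : Int :=
  ((player.map pvRank).count r : Int)

lemma pvRanks_nodup : pvRanksList.Nodup := by decide

-- A's counting loop: entry i of num_decks counts the cards of rank ranks[i]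
-- (a card whose rank is not in ranks is skipped by the port where Python raises;
-- such a card can never change entry i, so the characterisation is unconditional)
lemma ndSpec (player : List String)
    (nd : List Int) (hlen : nd.length = 13) (i : Nat) (hi : i < 13) :
    (player.foldl (fun nd card =>
      match PySem.List.index? pvRanksList (pvRank card) with
      | some i => nd.set i (nd.getD i 0 + 1)
      | none => nd) nd).getD i 0
    = nd.getD i 0 + pvCnt player (pvRanksList.getD i "") := by
  have hlen13 : pvRanksList.length = 13 := by rfl
  induction player generalizing nd with
  | nil => simp [pvCnt]
  | cons c cs ih =>
    rw [List.foldl_cons]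
    cases hj : PySem.List.index? pvRanksList (pvRank c) with
    | none =>
      rw [ih _ hlen]
      have hmem : pvRanksList.getD i "" ∈ pvRanksList := by
        rw [List.getD_eq_getElem _ _ (by omega)]
        exact List.getElem_mem _
      have hnot : pvRank c ∉ pvRanksList := by
        rw [← PySem.List.index?_eq_none_iff]; exact hj
      have hb : (pvRank c == pvRanksList.getD i "") = false := by
        rw [beq_eq_false_iff_ne]; intro he; exact hnot (he ▸ hmem)
      simp only [pvCnt, List.map_cons, List.count_cons, hb, Bool.false_eq_true, if_false]
      push_cast; ring
    | some j =>
    obtain ⟨hjlen, hjv, -⟩ := PySem.List.getElem_of_index?_eq_some hj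
    have hj13 : j < 13 := by omega
    rw [ih _ (by simp [hlen])]
    have hset : (nd.set j (nd.getD j 0 + 1)).getD i 0
        = if j = i then nd.getD i 0 + 1 else nd.getD i 0 := by
      have hi' : i < nd.length := by omega
      have hj' : j < nd.length := by omega
      by_cases hij : j = i
      · subst hij
        simp [List.getD_eq_getElem?_getD, hj']
      · simp [List.getD_eq_getElem?_getD, hij]
    have hcount : pvCnt (c :: cs) (pvRanksList.getD i "")
        = pvCnt cs (pvRanksList.getD i "") + (if j = i then 1 else 0) := by
      have hgd : pvRanksList.getD i "" = pvRanksList[i]'(by simp only [hlen13]; omega) :=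
        List.getD_eq_getElem _ _ (by simp only [hlen13]; omega)
      have hiff : (pvRank c = pvRanksList.getD i "") ↔ j = i := by
        rw [hgd, ← hjv]
        constructor
        · intro he
          exact (List.Nodup.getElem_inj_iff pvRanks_nodup).1 he
        · intro he; subst he; rfl
      simp only [pvCnt, List.map_cons, List.count_cons]
      by_cases hij : j = i
      · have hb : (pvRank c == pvRanksList.getD i "") = true := by
          rw [beq_iff_eq]; exact hiff.2 hij
        simp only [hb, hij, if_true]
        push_cast; ring
      · have hb : (pvRank c == pvRanksList.getD i "") = false := by
          rw [beq_eq_false_iff_ne]; intro he; exact hij (hiff.1 he)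
        simp only [hb, hij, if_false, Bool.false_eq_true]
        push_cast; ring
    rw [hset, hcount]
    by_cases hij : j = i
    · simp [hij]; omega
    · simp [hij]

-- B's counting loop: under Pre_, every card hits an existing key and the dict holds
-- exactly the rank counts (the keys stay the 13 ranks throughout)
lemma dictSpec2 (player : List String) (hpre : ∀ c ∈ player, pvRank c ∈ pvRanksList)
    (d : PySem.Dict String Int) (hinv : ∀ k ∈ pvRanksList, d.contains k = true)
    (r : String) (hr : r ∈ pvRanksList) :
    (player.foldl (fun d card =>
      match d.get? (pvRank card) with
      | some v => d.insert (pvRank card) (v + 1)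
      | none => d) d).get? r
    = some (d.getD r 0 + pvCnt player r) := by
  induction player generalizing d with
  | nil =>
    cases hg : d.get? r with
    | none =>
      have := hinv r hr
      rw [PySem.Dict.contains_eq_isSome_get?, hg] at this
      simp at this
    | some v =>
      simp [pvCnt, PySem.Dict.getD_eq_get?_getD, hg]
  | cons c cs ih =>
    have hc : pvRank c ∈ pvRanksList := hpre c (by simp)
    have hcont := hinv _ hc
    rw [PySem.Dict.contains_eq_isSome_get?] at hcont
    obtain ⟨v, hv⟩ := Option.isSome_iff_exists.mp hcont
    rw [List.foldl_cons]
    simp only [hv]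
    have hinv' : ∀ k ∈ pvRanksList, (d.insert (pvRank c) (v + 1)).contains k = true := by
      intro k hk
      rw [PySem.Dict.contains_insert]
      simp [hinv k hk]
    rw [ih (fun c hc => hpre c (by simp [hc])) _ hinv']
    rw [PySem.Dict.getD_insert]
    have hvd : d.getD (pvRank c) 0 = v := by
      rw [PySem.Dict.getD_eq_get?_getD, hv]; rfl
    simp only [pvCnt, List.map_cons, List.count_cons]
    by_cases hrc : r = pvRank c
    · subst hrc
      rw [hvd]
      simp only [beq_self_eq_true, if_true]
      congr 1
      push_cast; ring
    · have hb : (pvRank c == r) = false := by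
        rw [beq_eq_false_iff_ne]; exact fun he => hrc he.symm
      simp only [if_neg hrc, hb, Bool.false_eq_true, if_false]
      norm_num

-- A's sequence of up-to-12 filter passes collapses to one filter by the book list
lemma foldFilterSpec (bk : String → Bool) (rs : List String) (pl : List String) (c : Int) :
    rs.foldl (fun (st : List String × Int) r =>
        if bk r then (st.1.filter (fun x => !(PySem.Str.isIn r x)), st.2 + 1) else st) (pl, c)
    = (pl.filter (fun x => !((rs.filter bk).any (fun r => PySem.Str.isIn r x))),
       c + ((rs.filter bk).length : Int)) := by
  induction rs generalizing pl c with
  | nil => simp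
  | cons r rs ih =>
    simp only [List.foldl_cons, List.filter_cons]
    by_cases hb : bk r
    · simp only [hb, reduceIte]
      rw [ih]
      simp only [Prod.mk.injEq]
      refine ⟨?_, ?_⟩
      · rw [List.filter_filter]
        apply List.filter_congr
        intro x _
        simp [Bool.and_comm]
      · simp only [List.length_cons]; push_cast; ring
    · simp only [hb, Bool.false_eq_true, reduceIte]
      simpa using ih pl c

-- the same collapse, phrased over an index range mapped to rank strings
lemma foldFilterSpec' (bk : String → Bool) (g : Nat → String) (n : Nat) (pl : List String) (c : Int) :
    (List.range n).foldl (fun (st : List String × Int) k =>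
        if bk (g k) then (st.1.filter (fun x => !(PySem.Str.isIn (g k) x)), st.2 + 1) else st) (pl, c)
    = (pl.filter (fun x => !((((List.range n).map g).filter bk).any (fun r => PySem.Str.isIn r x))),
       c + ((((List.range n).map g).filter bk).length : Int)) := by
  have h := foldFilterSpec bk ((List.range n).map g) pl c
  rw [List.foldl_map] at h
  exact h

theorem make_books_spec : Claim_equal_make_books := by
  intro player counter _ hpre
  unfold Spec_make_books make_books make_books_alt
  have hndv : ∀ i : Nat, i < 13 →
      (player.foldl (fun nd card =>
        match PySem.List.index? pvRanksList (pvRank card) with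
        | some i => nd.set i (nd.getD i 0 + 1)
        | none => nd) ([0,0,0,0,0,0,0,0,0,0,0,0,0] : List Int)).getD i 0
      = pvCnt player (pvRanksList.getD i "") := by
    intro i hi
    rw [ndSpec player _ (by decide) i hi]
    have h0 : ([0,0,0,0,0,0,0,0,0,0,0,0,0] : List Int).getD i 0 = 0 := by
      interval_cases i <;> rfl
    rw [h0]; ring
  have hd0 : ∀ r ∈ pvRanksList,
      (pvRanksList.foldl (fun d r => d.insert r 0) (PySem.Dict.empty : PySem.Dict String Int)).contains r = true
      ∧ (pvRanksList.foldl (fun d r => d.insert r 0) (PySem.Dict.empty : PySem.Dict String Int)).getD r 0 = 0 := by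
    decide
  have hcdv : ∀ r ∈ pvRanksList, ((player.foldl (fun d card =>
        match d.get? (pvRank card) with
        | some v => d.insert (pvRank card) (v + 1)
        | none => d)
        (pvRanksList.foldl (fun d r => d.insert r 0) (PySem.Dict.empty : PySem.Dict String Int))).get? r)
      = some (pvCnt player r) := by
    intro r hr
    rw [dictSpec2 player hpre _ (fun k hk => (hd0 k hk).1) r hr, (hd0 r hr).2, zero_add]
  have hrange : PySem.List.pyRange 0 12 1 = List.map (fun k : Nat => (k : Int)) (List.range 12) := by decide
  rw [hrange, List.foldl_map]
  have hstep : ∀ (st : List String × Int), ∀ k ∈ List.range 12,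
      (if PySem.List.pyGetD (player.foldl (fun (nd : List Int) card =>
          match PySem.List.index? pvRanksList (pvRank card) with
          | some i => nd.set i (nd.getD i 0 + 1)
          | none => nd) ([0,0,0,0,0,0,0,0,0,0,0,0,0] : List Int)) (k : Int) 0 ≥ 4 then
        (st.1.filter (fun x => !(PySem.Str.isIn (PySem.List.pyGetD pvRanksList (k : Int) "") x)), st.2 + 1)
      else st)
      = (if (fun r => decide (pvCnt player r ≥ 4)) ((fun k : Nat => pvRanksList.getD k "") k) = true then
        (st.1.filter (fun x => !(PySem.Str.isIn ((fun k : Nat => pvRanksList.getD k "") k) x)), st.2 + 1)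
      else st) := by
    intro st k hk
    have hk12 : k < 12 := List.mem_range.mp hk
    rw [PySem.List.pyGetD_natCast, PySem.List.pyGetD_natCast, hndv k (by omega)]
    simp
  have hcong : (List.range 12).foldl (fun (st : List String × Int) (k : Nat) =>
      if PySem.List.pyGetD (player.foldl (fun (nd : List Int) card =>
          match PySem.List.index? pvRanksList (pvRank card) with
          | some i => nd.set i (nd.getD i 0 + 1)
          | none => nd) ([0,0,0,0,0,0,0,0,0,0,0,0,0] : List Int)) (k : Int) 0 ≥ 4 then
        (st.1.filter (fun x => !(PySem.Str.isIn (PySem.List.pyGetD pvRanksList (k : Int) "") x)), st.2 + 1)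
      else st) (player, counter)
      = (List.range 12).foldl (fun (st : List String × Int) (k : Nat) =>
      if (fun r => decide (pvCnt player r ≥ 4)) ((fun k : Nat => pvRanksList.getD k "") k) = true then
        (st.1.filter (fun x => !(PySem.Str.isIn ((fun k : Nat => pvRanksList.getD k "") k) x)), st.2 + 1)
      else st) (player, counter) :=
    PySem.List.foldl_congr_mem _ _ _ _ (fun st k hk => hstep st k hk)
  rw [hcong]
  rw [foldFilterSpec' (fun r => decide (pvCnt player r ≥ 4)) (fun k : Nat => pvRanksList.getD k "") 12 player counter]
  have hmap : (List.range 12).map (fun k : Nat => pvRanksList.getD k "")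
      = PySem.List.slice pvRanksList none (some 12) := by decide
  rw [hmap]
  have hfilt : (PySem.List.slice pvRanksList none (some 12)).filter (fun r => decide (pvCnt player r ≥ 4))
      = (PySem.List.slice pvRanksList none (some 12)).filter (fun r =>
          match (player.foldl (fun d card =>
            match d.get? (pvRank card) with
            | some v => d.insert (pvRank card) (v + 1)
            | none => d)
            (pvRanksList.foldl (fun d r => d.insert r 0) (PySem.Dict.empty : PySem.Dict String Int))).get? r with
          | some v => decide (v ≥ 4)
          | none => false) := by
    apply List.filter_congr
    intro r hr
    rw [hcdv r (PySem.List.mem_of_mem_slice _ none (some 12) hr)]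
  rw [hfilt]
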